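-- pv_equiv track=rewrite | github.com/bsmith89/compbio-template | scripts/parse_make_db.py | chunk_recipes
-- ===== SOURCE A (Python) =====
-- def recipe_start(line):
--     """Determine if a line looks like 'target: prerequisites'."""
--     return (not line.startswith("#")) and \
--            (not line.startswith("\t")) and \
--            (': ' in line)
--
-- def chunk_recipes(lines):
--     """Split explicit recipes into chunks."""
--     current_chunk = []
--     in_chunk = False
--     for line in lines:
--         if recipe_start(line):
--             assert not in_chunk, (current_chunk, line)
--             in_chunk = True
--             current_chunk.append(line)
--         elif in_chunk and (line == '\n'):
--             yield ''.join(current_chunk)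
--             current_chunk = []
--             in_chunk = False
--         elif in_chunk:
--             current_chunk.append(line)
-- ===== SOURCE B (Python) =====
-- def recipe_start(line):
--     """Determine if a line looks like 'target: prerequisites'."""
--     return (not line.startswith("#")) and \
--            (not line.startswith("\t")) and \
--            (': ' in line)
--
-- def chunk_recipes(lines):
--     """Split explicit recipes into chunks (nested-loop decomposition)."""
--     it = iter(lines)
--     for line in it:
--         if recipe_start(line):
--             chunk = [line]
--             for nxt in it:
--                 if recipe_start(nxt):
--                     raise AssertionError((chunk, nxt))
--                 elif nxt == '\n':
--                     yield ''.join(chunk)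
--                     break
--                 else:
--                     chunk.append(nxt)
-- ===== Notes on version B (the rewrite author's own statement) =====
-- stated objective: alternative
-- what changed: Replaces A's single loop with an in_chunk flag and persistent current_chunk state by a nested-loop decomposition over one shared iterator: an outer loop that skips to each recipe start and an inner loop that consumes that chunk's body.
import Mathlib
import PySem

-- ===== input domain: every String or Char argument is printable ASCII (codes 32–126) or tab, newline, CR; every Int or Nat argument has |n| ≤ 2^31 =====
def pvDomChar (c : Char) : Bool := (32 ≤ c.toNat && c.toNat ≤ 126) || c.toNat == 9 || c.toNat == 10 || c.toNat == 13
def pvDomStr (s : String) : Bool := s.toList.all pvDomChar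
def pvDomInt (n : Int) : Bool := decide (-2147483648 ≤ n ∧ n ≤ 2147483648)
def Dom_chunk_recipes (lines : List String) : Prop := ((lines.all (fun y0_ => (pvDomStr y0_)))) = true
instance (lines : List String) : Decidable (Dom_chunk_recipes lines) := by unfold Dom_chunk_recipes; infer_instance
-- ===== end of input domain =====

-- B replaces A's single flag-driven loop by a nested iterator decomposition (outer loop finds a
-- recipe start, inner loop consumes its body); same return values, no speed claim.

-- ===== PORT A =====
def recipe_start (line : String) : Bool :=
  (!PySem.Str.startswith line "#") && (!PySem.Str.startswith line "\t") && PySem.Str.isIn ": " line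

-- A's loop state: (chunks yielded so far, current_chunk, in_chunk); none = AssertionError raised.
def chunkStep (s : Option (List String × List String × Bool)) (line : String) :
    Option (List String × List String × Bool) :=
  match s with
  | none => none
  | some (acc, cur, inch) =>
    if recipe_start line then
      if inch then none
      else some (acc, cur ++ [line], true)
    else if inch && (line == "\n") then
      some (acc ++ [PySem.Str.join "" cur], [], false)
    else if inch then
      some (acc, cur ++ [line], inch)
    else
      some (acc, cur, inch)

def chunk_recipes (lines : List String) : List String :=
  ((lines.foldl chunkStep (some ([], [], false))).map (·.1)).getD []

-- ===== PORT B =====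
-- outer loop: skip until a recipe start; inner loop: consume the chunk's body from the shared
-- iterator (= the remaining list). none = AssertionError raised.
mutual
def chunkOuter (lines : List String) : Option (List String) :=
  match lines with
  | [] => some []
  | l :: rest => if recipe_start l then chunkInner [l] rest else chunkOuter rest

def chunkInner (chunk : List String) (lines : List String) : Option (List String) :=
  match lines with
  | [] => some []   -- iterator exhausted mid-chunk: partial chunk dropped
  | l :: rest =>
    if recipe_start l then none
    else if l == "\n" then (chunkOuter rest).map (PySem.Str.join "" chunk :: ·)
    else chunkInner (chunk ++ [l]) rest
end

def chunk_recipes_alt (lines : List String) : List String :=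
  (chunkOuter lines).getD []

-- ===== PRECONDITION & SPEC =====
-- Pre_ excludes exactly the inputs on which A's assert fires (AssertionError): two recipe-start
-- lines with no blank line "\n" strictly between them.
def Pre_chunk_recipes (lines : List String) : Prop :=
  ∀ j < lines.length, ∀ i < j,
    (recipe_start (lines.getD i "") = true ∧ recipe_start (lines.getD j "") = true) →
      ∃ k < j, i < k ∧ lines.getD k "" = "\n"
instance (lines : List String) : Decidable (Pre_chunk_recipes lines) := by
  unfold Pre_chunk_recipes; infer_instance
def pvWitness_chunk_recipes : List String := ["a: b\n", "\tcmd\n", "\n", "c: d\n", "x\n", "\n"]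
def Spec_chunk_recipes (lines : List String) (out : List String) : Prop := out = chunk_recipes_alt lines
instance (lines : List String) (out : List String) : Decidable (Spec_chunk_recipes lines out) := by unfold Spec_chunk_recipes; infer_instance

-- ===== CLAIM (what is proved, stated in full; the proofs are below) =====
def Claim_equal_chunk_recipes : Prop := ∀ (lines : List String), Dom_chunk_recipes lines → Pre_chunk_recipes lines → Spec_chunk_recipes lines (chunk_recipes lines)

-- ===== LEMMAS AND PROOFS =====

theorem foldl_chunkStep_none (ls : List String) : ls.foldl chunkStep none = none := by
  induction ls with
  | nil => rfl
  | cons l rest ih => simpa [chunkStep] using ih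

-- Relating A's fold from its two kinds of states to B's two loops, for any accumulator prefix.
theorem chunk_fold_eq (lines : List String) :
    (∀ acc, (lines.foldl chunkStep (some (acc, [], false))).map (·.1)
        = (chunkOuter lines).map (acc ++ ·)) ∧
    (∀ acc cur, (lines.foldl chunkStep (some (acc, cur, true))).map (·.1)
        = (chunkInner cur lines).map (acc ++ ·)) := by
  induction lines with
  | nil => simp [chunkOuter, chunkInner]
  | cons l rest ih =>
    constructor
    · intro acc
      by_cases h : recipe_start l = true
      · simp only [List.foldl_cons, chunkStep, h, if_true, chunkOuter]
        exact ih.2 acc [l]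
      · simp only [List.foldl_cons, chunkStep, h, chunkOuter, Bool.false_and,
          Bool.false_eq_true, if_false]
        exact ih.1 acc
    · intro acc cur
      by_cases h : recipe_start l = true
      · simp [List.foldl_cons, chunkStep, h, chunkInner, foldl_chunkStep_none]
      · by_cases hn : l = "\n"
        · subst hn
          simp only [List.foldl_cons, chunkStep, eq_false_of_ne_true h, Bool.false_eq_true,
            if_false, Bool.true_and, BEq.rfl, if_true, chunkInner]
          rw [ih.1 (acc ++ [PySem.Str.join "" cur]), Option.map_map]
          cases chunkOuter rest <;> simp
        · have hb : (l == "\n") = false := by simp [hn]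
          simp only [List.foldl_cons, chunkStep, eq_false_of_ne_true h, Bool.false_eq_true,
            if_false, Bool.true_and, hb, chunkInner]
          exact ih.2 acc (cur ++ [l])

theorem chunk_recipes_spec : Claim_equal_chunk_recipes := by
  intro lines _ _
  unfold Spec_chunk_recipes chunk_recipes chunk_recipes_alt
  rw [(chunk_fold_eq lines).1 []]
  cases chunkOuter lines <;> simp
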